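-- pv_equiv track=rewrite | github.com/gtrivedi88/content-editorial-assistant | ambiguity/detectors/pronoun_ambiguity_detector.py | _has_similar_entity_types
-- ===== SOURCE A (Python) =====
-- from typing import List, Dict, Any, Optional, Set
--
-- def _has_similar_entity_types(referents: List[Dict[str, Any]]) -> bool:
--     """Check if referents represent similar types of entities."""
--     if len(referents) < 2:
--         return False
--
--     # Group similar entities
--     software_entities = ['system', 'service', 'application', 'software', 'program', 'tool']
--     hardware_entities = ['server', 'database', 'network', 'device', 'machine', 'computer']
--
--     software_count = sum(1 for r in referents if r['lemma'].lower() in software_entities)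
--     hardware_count = sum(1 for r in referents if r['lemma'].lower() in hardware_entities)
--
--     # If most referents are of the same type, they're similar
--     return software_count >= 2 or hardware_count >= 2
-- ===== SOURCE B (Python) =====
-- def _has_similar_entity_types(referents):
--     """Check if referents represent similar types of entities.
--
--     Instead of counting per-category occurrences, search for a witness pair:
--     two referents whose lemmas fall into the same category. 'count >= 2'
--     holds exactly when such a pair exists."""
--     if len(referents) < 2:
--         return False
--
--     soft = {'system', 'service', 'application', 'software', 'program', 'tool'}
--     hard = {'server', 'database', 'network', 'device', 'machine', 'computer'}
--
--     lemmas = [r['lemma'].lower() for r in referents]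
--     for i, w in enumerate(lemmas):
--         for v in lemmas[i + 1:]:
--             if (w in soft and v in soft) or (w in hard and v in hard):
--                 return True
--     return False
-- ===== Notes on version B (the rewrite author's own statement) =====
-- stated objective: alternative
-- what changed: Replaces A's two per-category counting passes with a pairwise witness search: a category has at least two members iff some pair of referents has lemmas in the same category, so B scans pairs and returns True at the first such pair, never maintaining any counts.
import Mathlib
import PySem

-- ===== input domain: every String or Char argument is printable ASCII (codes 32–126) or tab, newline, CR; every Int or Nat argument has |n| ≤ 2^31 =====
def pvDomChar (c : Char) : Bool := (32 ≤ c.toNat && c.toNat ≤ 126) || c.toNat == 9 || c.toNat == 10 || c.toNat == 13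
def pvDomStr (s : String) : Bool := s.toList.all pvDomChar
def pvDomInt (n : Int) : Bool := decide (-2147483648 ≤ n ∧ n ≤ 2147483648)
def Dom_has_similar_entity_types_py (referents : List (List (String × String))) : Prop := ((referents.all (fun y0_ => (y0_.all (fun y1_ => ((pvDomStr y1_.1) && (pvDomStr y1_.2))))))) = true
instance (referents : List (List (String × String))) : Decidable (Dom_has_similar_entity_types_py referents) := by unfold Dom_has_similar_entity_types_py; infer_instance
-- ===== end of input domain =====

-- B searches for a witness pair of referents whose lemmas share a category instead of A's two per-category counting passes; equal return value on Pre_ (where A raises no KeyError).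

-- ===== PORT A =====
-- r['lemma']: Pre_ guarantees the key is present (Python raises KeyError otherwise, excluded by Pre_)
def pvLemma (r : List (String × String)) : String :=
  ((PySem.Dict.mk r).get? "lemma").getD ""

def pvSoft : List String := ["system", "service", "application", "software", "program", "tool"]
def pvHard : List String := ["server", "database", "network", "device", "machine", "computer"]

def has_similar_entity_types_py (referents : List (List (String × String))) : Bool :=
  if referents.length < 2 then false
  else
    let software_count : Int :=
      referents.foldl (fun acc r => if pvSoft.contains (PySem.Str.lower (pvLemma r)) then acc + 1 else acc) 0
    let hardware_count : Int :=
      referents.foldl (fun acc r => if pvHard.contains (PySem.Str.lower (pvLemma r)) then acc + 1 else acc) 0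
    decide (2 ≤ software_count) || decide (2 ≤ hardware_count)

-- ===== PORT B =====
-- the two Python sets of category words
def pvSoftSet : PySem.Set String := PySem.Set.ofList ["system", "service", "application", "software", "program", "tool"]
def pvHardSet : PySem.Set String := PySem.Set.ofList ["server", "database", "network", "device", "machine", "computer"]

-- outer loop over lemmas; at each element w the inner loop scans the tail (lemmas[i+1:])
def pvPairLoop : List String → Bool
  | [] => false
  | w :: rest =>
    if rest.any (fun v =>
        (pvSoftSet.contains w && pvSoftSet.contains v) ||
        (pvHardSet.contains w && pvHardSet.contains v)) then true
    else pvPairLoop rest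

def has_similar_entity_types_py_alt (referents : List (List (String × String))) : Bool :=
  if referents.length < 2 then false
  else pvPairLoop (referents.map (fun r => PySem.Str.lower (pvLemma r)))

-- ===== PRECONDITION & SPEC =====
-- Pre_ excludes exactly the inputs where Python A raises KeyError: two or more referents and some referent without a 'lemma' key.
def Pre_has_similar_entity_types_py (referents : List (List (String × String))) : Prop :=
  referents.length < 2 ∨ ∀ r ∈ referents, (((PySem.Dict.mk r).get? "lemma").isSome = true)
instance (referents : List (List (String × String))) : Decidable (Pre_has_similar_entity_types_py referents) := by unfold Pre_has_similar_entity_types_py; infer_instance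

def pvWitness_has_similar_entity_types_py : (List (List (String × String))) :=
  [[("lemma", "System")], [("lemma", "server")], [("lemma", "server")]]

def Spec_has_similar_entity_types_py (referents : List (List (String × String))) (out : Bool) : Prop := out = has_similar_entity_types_py_alt referents
instance (referents : List (List (String × String))) (out : Bool) : Decidable (Spec_has_similar_entity_types_py referents out) := by unfold Spec_has_similar_entity_types_py; infer_instance

-- ===== CLAIM (what is proved, stated in full; the proofs are below) =====
def Claim_equal_has_similar_entity_types_py : Prop := ∀ (referents : List (List (String × String))), Dom_has_similar_entity_types_py referents → Pre_has_similar_entity_types_py referents → Spec_has_similar_entity_types_py referents (has_similar_entity_types_py referents)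

-- ===== LEMMAS AND PROOFS =====

lemma softSet_eq (w : String) : pvSoftSet.contains w = pvSoft.contains w := by
  simp [pvSoftSet, pvSoft, PySem.Set.contains, PySem.Set.ofList, List.contains_eq_mem]

lemma hardSet_eq (w : String) : pvHardSet.contains w = pvHard.contains w := by
  simp [pvHardSet, pvHard, PySem.Set.contains, PySem.Set.ofList, List.contains_eq_mem]

lemma soft_hard_disjoint (w : String) :
    ¬ (pvSoft.contains w = true ∧ pvHard.contains w = true) := by
  rintro ⟨hs, hh⟩
  simp only [pvSoft, pvHard, List.contains_eq_mem, List.mem_cons, List.not_mem_nil, or_false,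
    decide_eq_true_eq] at hs hh
  rcases hs with rfl|rfl|rfl|rfl|rfl|rfl <;>
    rcases hh with h|h|h|h|h|h <;> exact absurd h (by decide)

lemma any_eq_count (l : List String) (p : String → Bool) :
    l.any p = decide (1 ≤ l.countP p) := by
  cases h : l.any p with
  | false =>
    symm
    rw [decide_eq_false_iff_not]
    simp only [List.any_eq_false] at h
    have hz : l.countP p = 0 := List.countP_eq_zero.mpr h
    omega
  | true =>
    symm
    rw [decide_eq_true_iff]
    simp only [List.any_eq_true] at h
    obtain ⟨x, hx, hpx⟩ := h
    have hmem : x ∈ l.filter p := List.mem_filter.mpr ⟨hx, hpx⟩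
    have hpos : 0 < (l.filter p).length := List.length_pos_of_mem hmem
    rw [List.countP_eq_length_filter]
    omega

lemma pairLoop_step (w : String) (t : List String) :
    pvPairLoop (w :: t) =
      ((t.any (fun v =>
        (pvSoftSet.contains w && pvSoftSet.contains v) ||
        (pvHardSet.contains w && pvHardSet.contains v))) || pvPairLoop t) := by
  rw [pvPairLoop]
  cases h : (t.any (fun v =>
        (pvSoftSet.contains w && pvSoftSet.contains v) ||
        (pvHardSet.contains w && pvHardSet.contains v))) <;> simp

lemma pairLoop_eq (l : List String) :
    pvPairLoop l = decide (2 ≤ l.countP pvSoft.contains ∨ 2 ≤ l.countP pvHard.contains) := by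
  induction l with
  | nil => simp [pvPairLoop]
  | cons w t ih =>
    have etaS : (fun v => pvSoft.contains v) = pvSoft.contains := rfl
    have etaH : (fun v => pvHard.contains v) = pvHard.contains := rfl
    rw [pairLoop_step, ih]
    simp only [List.countP_cons]
    by_cases hs : pvSoft.contains w = true
    · have hh : pvHard.contains w = false := by
        by_contra hcon
        exact soft_hard_disjoint w ⟨hs, by simpa using hcon⟩
      simp only [softSet_eq, hardSet_eq, hs, hh, Bool.true_and, Bool.false_and, Bool.or_false,
        if_true, Bool.false_eq_true, if_false]
      rw [etaS, any_eq_count, ← Bool.decide_or]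
      apply decide_eq_decide.mpr
      omega
    · have hs' : pvSoft.contains w = false := by simpa using hs
      by_cases hh : pvHard.contains w = true
      · simp only [softSet_eq, hardSet_eq, hs', hh, Bool.true_and, Bool.false_and, Bool.false_or,
          if_true, Bool.false_eq_true, if_false]
        rw [etaH, any_eq_count, ← Bool.decide_or]
        apply decide_eq_decide.mpr
        omega
      · have hh' : pvHard.contains w = false := by simpa using hh
        simp only [softSet_eq, hardSet_eq, hs', hh', Bool.false_and, Bool.or_self,
          Bool.false_eq_true, if_false]
        have hz : (t.any fun _ => false) = false := by simp
        rw [hz, Bool.false_or]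
        simp

def pvIsSoft (r : List (String × String)) : Bool := pvSoft.contains (PySem.Str.lower (pvLemma r))
def pvIsHard (r : List (String × String)) : Bool := pvHard.contains (PySem.Str.lower (pvLemma r))

lemma foldl_soft : ∀ (l : List (List (String × String))) (acc : Int),
    l.foldl (fun acc r => if pvSoft.contains (PySem.Str.lower (pvLemma r)) then acc + 1 else acc) acc
      = acc + (l.countP pvIsSoft : Int) := by
  intro l
  induction l with
  | nil => simp
  | cons x t ih =>
    intro acc
    simp only [List.foldl_cons, List.countP_cons, ih, pvIsSoft]
    split <;> push_cast <;> ring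

lemma foldl_hard : ∀ (l : List (List (String × String))) (acc : Int),
    l.foldl (fun acc r => if pvHard.contains (PySem.Str.lower (pvLemma r)) then acc + 1 else acc) acc
      = acc + (l.countP pvIsHard : Int) := by
  intro l
  induction l with
  | nil => simp
  | cons x t ih =>
    intro acc
    simp only [List.foldl_cons, List.countP_cons, ih, pvIsHard]
    split <;> push_cast <;> ring

-- ===== VERDICT (by name: the statement is the Claim_ definition above) =====
theorem has_similar_entity_types_py_spec : Claim_equal_has_similar_entity_types_py := by
  intro referents _ _
  unfold Spec_has_similar_entity_types_py has_similar_entity_types_py has_similar_entity_types_py_alt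
  by_cases hlen : referents.length < 2
  · rw [if_pos hlen, if_pos hlen]
  · rw [if_neg hlen, if_neg hlen]
    simp only [foldl_soft, foldl_hard, zero_add]
    rw [pairLoop_eq, List.countP_map, List.countP_map, ← Bool.decide_or]
    apply decide_eq_decide.mpr
    have e1 : (pvSoft.contains ∘ fun r => PySem.Str.lower (pvLemma r)) = pvIsSoft := rfl
    have e2 : (pvHard.contains ∘ fun r => PySem.Str.lower (pvLemma r)) = pvIsHard := rfl
    rw [e1, e2]
    omega
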